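-- pv_equiv track=rewrite | github.com/JonathanGupton/advent_of_code | y2015/day13.py | make_arrangement
-- ===== SOURCE A (Python) =====
-- def make_arrangement(order):
--     arrangement = []
--     for i in range(len(order)):
--         try:
--             arrangement.append((order[i], order[i + 1]))
--         except IndexError:
--             arrangement.append((order[i], order[0]))
--     return tuple(arrangement)
-- ===== SOURCE B (Python) =====
-- def make_arrangement(order):
--     rotated = order[1:] + order[:1]
--     return tuple(zip(order, rotated))
-- ===== Notes on version B (the rewrite author's own statement) =====
-- stated objective: idiomatic
-- what changed: Replaces index arithmetic with try/except IndexError wraparound by zipping the list with its one-step rotation (order[1:] + order[:1]).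
import Mathlib
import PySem

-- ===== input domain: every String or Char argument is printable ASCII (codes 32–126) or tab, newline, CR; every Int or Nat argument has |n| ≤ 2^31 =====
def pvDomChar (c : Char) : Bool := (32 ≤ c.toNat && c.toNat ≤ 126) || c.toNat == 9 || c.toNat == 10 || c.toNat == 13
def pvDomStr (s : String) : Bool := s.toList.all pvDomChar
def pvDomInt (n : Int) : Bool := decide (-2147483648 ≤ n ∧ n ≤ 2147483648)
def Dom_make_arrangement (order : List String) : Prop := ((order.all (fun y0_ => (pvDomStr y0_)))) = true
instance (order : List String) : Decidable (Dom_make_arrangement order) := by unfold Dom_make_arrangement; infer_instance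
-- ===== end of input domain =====

-- B: zip the list with its one-step rotation instead of A's index arithmetic with try/except wraparound (idiomatic; same O(n) cost).
-- ===== PORT A =====
-- try: order[i+1]  except IndexError: order[0]   (order[i] is always in range inside the loop)
def pairAt (order : List String) (i : Int) : String × String :=
  match PySem.List.pyGet? order (i + 1) with
  | some y => ((PySem.List.pyGet? order i).getD "", y)
  | none   => ((PySem.List.pyGet? order i).getD "", (PySem.List.pyGet? order 0).getD "")

def make_arrangement (order : List String) : List (String × String) :=
  (PySem.List.pyRange 0 (order.length : Int) 1).foldl
    (fun arrangement i => arrangement ++ [pairAt order i]) []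

-- ===== PORT B =====
def make_arrangement_alt (order : List String) : List (String × String) :=
  List.zip order
    (PySem.List.slice order (some 1) none ++ PySem.List.slice order none (some 1))

-- ===== PRECONDITION & SPEC =====
def Spec_make_arrangement (order : List String) (out : List (String × String)) : Prop := out = make_arrangement_alt order
instance (order : List String) (out : List (String × String)) : Decidable (Spec_make_arrangement order out) := by unfold Spec_make_arrangement; infer_instance

-- ===== CLAIM (what is proved, stated in full; the proofs are below) =====
def Claim_equal_make_arrangement : Prop := ∀ (order : List String), Dom_make_arrangement order → Spec_make_arrangement order (make_arrangement order)

-- ===== LEMMAS AND PROOFS =====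

-- ===== VERDICT (by name: the statement is the Claim_ definition above) =====
lemma alt_eq (order : List String) :
    make_arrangement_alt order = order.zip (order.tail ++ order.take 1) := by
  simp [make_arrangement_alt, PySem.List.slice_from_one]
  rw [show (1 : Int) = ((1 : Nat) : Int) from rfl, PySem.List.slice_to_natCast]

lemma a_eq (order : List String) :
    make_arrangement order = (List.range order.length).map (fun k : Nat => pairAt order (k : Int)) := by
  rw [make_arrangement, PySem.List.pyRange_zero_natCast,
    PySem.List.foldl_append_singleton_eq_map (f := fun i => pairAt order i)]
  simp [List.map_map]

theorem make_arrangement_spec : Claim_equal_make_arrangement := by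
  intro order _
  unfold Spec_make_arrangement
  rw [alt_eq, a_eq]
  apply List.ext_getElem
  · cases order with
    | nil => simp
    | cons x xs => simp [List.length_zip]
  · intro k h1 h2
    simp only [List.getElem_map, List.getElem_range, List.getElem_zip, pairAt]
    rw [show ((k : Int) + 1) = (((k + 1 : Nat)) : Int) by push_cast; ring,
        PySem.List.pyGet?_natCast, PySem.List.pyGet?_natCast]
    by_cases h : k + 1 < order.length
    · simp only [List.length_map, List.length_range] at h1
      have ht : k < order.tail.length := by simp [List.length_tail]; omega
      rw [List.getElem_append_left ht, List.getElem_tail]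
      simp [List.getElem?_eq_getElem h1, List.getElem?_eq_getElem h]
    · simp only [List.length_map, List.length_range] at h1
      have hlen : order.tail.length ≤ k := by simp [List.length_tail]; omega
      rw [List.getElem_append_right hlen]
      rw [show (0 : Int) = ((0 : Nat) : Int) from rfl, PySem.List.pyGet?_natCast]
      have h0 : 0 < order.length := by omega
      rw [List.getElem?_eq_getElem h0, List.getElem?_eq_getElem h1]
      simp [List.getElem_take]
      rw [List.getElem?_eq_none (by omega)]
      have hz : k - (order.length - 1) = 0 := by omega
      simp [hz]
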